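-- pv_equiv track=rewrite | github.com/muyongKim/Step-By-Step | Programmers/Level 1/IntervalNum.py | solution
-- ===== SOURCE A (Python) =====
-- def solution(x,n):
--     answer = []
--     if x==0:                        # x = 0 일때 예외처리.
--         for i in range(n):
--             answer.append(x)
--     else:
--         answer = [v for v in range(x,x+x*n,x)]      # range의 arg3은 0이 올 수 없다.
--     return answer
-- ===== SOURCE B (Python) =====
-- def solution(x, n):
--     return [x * (i + 1) for i in range(n)]
-- ===== Notes on version B (the rewrite author's own statement) =====
-- stated objective: simpler
-- what changed: Replaces A's x==0 special case plus strided range(x, x+x*n, x) with a single branch-free comprehension multiplying each index in range(n) by x.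
import Mathlib
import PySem

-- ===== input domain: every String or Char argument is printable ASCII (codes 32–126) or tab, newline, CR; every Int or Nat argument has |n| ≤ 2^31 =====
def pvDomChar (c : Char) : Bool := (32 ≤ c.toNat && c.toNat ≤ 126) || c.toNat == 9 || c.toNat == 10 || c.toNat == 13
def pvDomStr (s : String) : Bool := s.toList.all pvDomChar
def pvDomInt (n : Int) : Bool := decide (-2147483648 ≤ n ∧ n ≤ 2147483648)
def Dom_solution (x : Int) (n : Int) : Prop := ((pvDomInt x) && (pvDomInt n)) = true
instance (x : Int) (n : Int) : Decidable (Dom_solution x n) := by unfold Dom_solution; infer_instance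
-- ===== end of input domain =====

-- B replaces A's x==0 special case and strided range(x, x+x*n, x) by one branch-free
-- comprehension [x*(i+1) for i in range(n)]; objective: simpler.


-- ===== PORT A =====
def solution (x : Int) (n : Int) : List Int :=
  if x == 0 then
    -- for i in range(n): answer.append(x)
    (PySem.List.pyRange 0 n 1).foldl (fun acc _ => acc ++ [x]) []
  else
    -- [v for v in range(x, x+x*n, x)]
    (PySem.List.pyRange x (x + x * n) x).map (fun v => v)

-- ===== PORT B =====
def solution_alt (x : Int) (n : Int) : List Int :=
  (PySem.List.pyRange 0 n 1).map (fun i => x * (i + 1))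

-- ===== PRECONDITION & SPEC =====
def Spec_solution (x : Int) (n : Int) (out : List Int) : Prop := out = solution_alt x n
instance (x : Int) (n : Int) (out : List Int) : Decidable (Spec_solution x n out) := by unfold Spec_solution; infer_instance

-- ===== CLAIM (what is proved, stated in full; the proofs are below) =====
def Claim_equal_solution : Prop := ∀ (x : Int) (n : Int), Dom_solution x n → Spec_solution x n (solution x n)

-- ===== LEMMAS AND PROOFS =====

theorem pv_foldl_append_replicate (x : Int) (l : List Int) (init : List Int) :
    l.foldl (fun acc _ => acc ++ [x]) init = init ++ List.replicate l.length x := by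
  induction l generalizing init with
  | nil => simp
  | cons h t ih => simp [List.foldl_cons, ih, List.replicate_succ, List.append_assoc]

-- B's comprehension, in List.range form
theorem pv_alt_eq (x n : Int) :
    solution_alt x n = (List.range n.toNat).map (fun (k : Nat) => x * ((k : Int) + 1)) := by
  unfold solution_alt
  rw [PySem.List.pyRange_one, List.map_map, Int.sub_zero]
  exact List.map_congr_left (fun a _ => by simp [Function.comp])

-- the strided range, for x ≠ 0, is exactly that list
theorem pv_stride_eq (x n : Int) (hx : x ≠ 0) :
    PySem.List.pyRange x (x + x * n) x = (List.range n.toNat).map (fun (k : Nat) => x * ((k : Int) + 1)) := by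
  rcases lt_or_gt_of_ne hx with hneg | hpos
  · unfold PySem.List.pyRange
    have h0 : ¬ (0 < x) := by omega
    simp only [if_neg hx, if_neg h0]
    by_cases hn : 0 < n
    · have hc : x + x * n < x := by nlinarith
      have harith : (x - (x + x * n) + -x - 1) / -x = n := by
        have h : x - (x + x * n) + -x - 1 = (-x - 1) + n * (-x) := by ring
        rw [h, Int.add_mul_ediv_right _ _ (by omega : (-x : Int) ≠ 0),
            Int.ediv_eq_zero_of_lt (by omega) (by omega)]
        ring
      rw [if_pos hc, harith]
      apply List.ext_getElem
      · simp
      · intro i h1 h2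
        simp only [List.getElem_map, List.getElem_range]
        ring
    · have hc : ¬ (x + x * n < x) := by nlinarith
      rw [if_neg hc]
      have : n.toNat = 0 := by omega
      simp [this]
  · unfold PySem.List.pyRange
    simp only [if_neg hx, if_pos hpos]
    by_cases hn : 0 < n
    · have hc : x < x + x * n := by nlinarith
      have harith : (x + x * n - x + x - 1) / x = n := by
        have h : x + x * n - x + x - 1 = (x - 1) + n * x := by ring
        rw [h, Int.add_mul_ediv_right _ _ (by omega : (x : Int) ≠ 0),
            Int.ediv_eq_zero_of_lt (by omega) (by omega)]
        ring
      rw [if_pos hc, harith]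
      apply List.ext_getElem
      · simp
      · intro i h1 h2
        simp only [List.getElem_map, List.getElem_range]
        ring
    · have hc : ¬ (x < x + x * n) := by nlinarith
      rw [if_neg hc]
      have : n.toNat = 0 := by omega
      simp [this]

-- ===== VERDICT (by name: the statement is the Claim_ definition above) =====
theorem solution_spec : Claim_equal_solution := by
  intro x n _
  show solution x n = solution_alt x n
  unfold solution
  by_cases hx : x = 0
  · subst hx
    simp only [beq_self_eq_true, if_pos]
    rw [pv_foldl_append_replicate, pv_alt_eq]
    simp [PySem.List.pyRange_one]
  · rw [if_neg (by simpa using hx), pv_alt_eq, pv_stride_eq x n hx]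
    simp
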